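-- pv_equiv track=rewrite | github.com/shura08g/numpy | HackerRank/15_JumpingOnTheClouds_Revisited.py | jumpingOnClouds
-- ===== SOURCE A (Python) =====
-- def jumpingOnClouds(c, k):
--     result = 100
--     length = len(c)
--     i = k % length
--     result -= c[i] * 2 + 1
--     while i != 0:
--         i = (i + k) % length
--         result -= c[i] * 2 + 1
--     return result
-- ===== SOURCE B (Python) =====
-- def jumpingOnClouds(c, k):
--     length = len(c)
--     # Euclid's algorithm; k % length raises ZeroDivisionError on empty c just like A
--     a, b = k % length, length
--     while b:
--         a, b = b, a % b
--     # the clouds landed on are exactly the multiples of g = gcd(k, length)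
--     return 100 - sum(2 * c[p] + 1 for p in range(0, length, a))
-- ===== Notes on version B (the rewrite author's own statement) =====
-- stated objective: simpler
-- what changed: Replaces the step-by-step orbit walk with a direct characterization: the clouds landed on are exactly the multiples of g = gcd(k, len(c)), so B sums 2*c[p]+1 over range(0, len(c), g) after computing g with Euclid's algorithm (no per-step modular arithmetic).
import Mathlib
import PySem

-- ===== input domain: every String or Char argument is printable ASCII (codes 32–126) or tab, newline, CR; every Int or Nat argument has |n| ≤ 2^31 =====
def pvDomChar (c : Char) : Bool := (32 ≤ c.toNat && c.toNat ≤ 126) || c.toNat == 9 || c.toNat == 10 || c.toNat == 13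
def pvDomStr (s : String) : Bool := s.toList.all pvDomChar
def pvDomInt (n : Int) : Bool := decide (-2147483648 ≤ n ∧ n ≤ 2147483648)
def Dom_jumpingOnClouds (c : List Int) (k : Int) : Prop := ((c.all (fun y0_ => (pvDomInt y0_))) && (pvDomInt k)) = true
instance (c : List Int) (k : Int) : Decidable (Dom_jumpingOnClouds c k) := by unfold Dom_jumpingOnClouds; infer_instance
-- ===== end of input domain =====

-- B replaces A's step-by-step orbit walk by summing directly over the multiples of gcd(k, len(c)),
-- which are exactly the clouds landed on (objective: simpler; return value only, no mutation).


-- ===== PORT A =====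
-- the 'while i != 0' loop; fuel (= len(c)) only makes it total, the loop always
-- stops at i = 0 within len(c) rounds (proved below)
def loopA (c : List Int) (k n : Int) : Nat → Int → Int → Int
  | 0, _, acc => acc
  | fuel+1, i, acc =>
    if i = 0 then acc
    else
      let i' := PySem.Int.mod (i + k) n
      loopA c k n fuel i' (acc - (PySem.List.pyGetD c i' 0 * 2 + 1))

def jumpingOnClouds (c : List Int) (k : Int) : Int :=
  let n : Int := c.length
  let i := PySem.Int.mod k n
  loopA c k n c.length i (100 - (PySem.List.pyGetD c i 0 * 2 + 1))

-- ===== PORT B =====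
-- termination measure for the hand-written Euclid loop in Source B
lemma pymod_natAbs_lt (a b : Int) (hb : b ≠ 0) : (PySem.Int.mod a b).natAbs < b.natAbs := by
  rcases lt_or_gt_of_ne hb with h | h
  · have h1 := PySem.Int.mod_neg_bounds (a := a) h
    omega
  · have h1 := PySem.Int.mod_nonneg (a := a) h
    have h2 := PySem.Int.mod_lt (a := a) h
    omega

def gcdLoop (a b : Int) : Int :=
  if h : b ≠ 0 then gcdLoop b (PySem.Int.mod a b) else a
termination_by b.natAbs
decreasing_by exact pymod_natAbs_lt a b h

def jumpingOnClouds_alt (c : List Int) (k : Int) : Int :=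
  let n : Int := c.length
  let g := gcdLoop (PySem.Int.mod k n) n
  100 - ((PySem.List.pyRange 0 n g).map (fun p => 2 * PySem.List.pyGetD c p 0 + 1)).sum

-- ===== PRECONDITION & SPEC =====
-- Pre_ excludes only the empty list, on which A raises ZeroDivisionError (k % 0)
def Pre_jumpingOnClouds (c : List Int) (k : Int) : Prop := c ≠ []
instance (c : List Int) (k : Int) : Decidable (Pre_jumpingOnClouds c k) := by unfold Pre_jumpingOnClouds; infer_instance
def pvWitness_jumpingOnClouds : List Int × Int := ([1, 0, 1, 1], 2)

def Spec_jumpingOnClouds (c : List Int) (k : Int) (out : Int) : Prop := out = jumpingOnClouds_alt c k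
instance (c : List Int) (k : Int) (out : Int) : Decidable (Spec_jumpingOnClouds c k out) := by unfold Spec_jumpingOnClouds; infer_instance

-- ===== CLAIM (what is proved, stated in full; the proofs are below) =====
def Claim_equal_jumpingOnClouds : Prop := ∀ (c : List Int) (k : Int), Dom_jumpingOnClouds c k → Pre_jumpingOnClouds c k → Spec_jumpingOnClouds c k (jumpingOnClouds c k)

-- ===== LEMMAS AND PROOFS =====

-- the Euclid loop computes gcd on naturals
lemma gcdLoop_natCast (b a : Nat) : gcdLoop (a : Int) (b : Int) = (Nat.gcd a b : Int) := by
  induction b using Nat.strong_induction_on generalizing a with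
  | _ b ih =>
    rw [gcdLoop]
    by_cases hb : b = 0
    · subst hb; simp
    · have hbI : (b : Int) ≠ 0 := by exact_mod_cast hb
      rw [dif_pos hbI, PySem.Int.mod_natCast, ih (a % b) (Nat.mod_lt a (Nat.pos_of_ne_zero hb)) b]
      rw [Nat.gcd_comm b (a % b), ← Nat.gcd_rec, Nat.gcd_comm]

-- n ∣ j*kn iff (n / gcd kn n) ∣ j
lemma dvd_mul_iff_ord (kn n : Nat) (hn : 0 < n) (j : Nat) :
    n ∣ j * kn ↔ (n / Nat.gcd kn n) ∣ j := by
  set g := Nat.gcd kn n with hg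
  have hgpos : 0 < g := Nat.gcd_pos_of_pos_right _ hn
  have hgk : g ∣ kn := Nat.gcd_dvd_left _ _
  have hgn : g ∣ n := Nat.gcd_dvd_right _ _
  constructor
  · rintro ⟨t, ht⟩
    have hstep : j * (kn / g) = (n / g) * t := by
      apply Nat.eq_of_mul_eq_mul_left hgpos
      calc g * (j * (kn / g)) = j * (g * (kn / g)) := by ring
        _ = j * kn := by rw [Nat.mul_div_cancel' hgk]
        _ = n * t := ht
        _ = (g * (n / g)) * t := by rw [Nat.mul_div_cancel' hgn]
        _ = g * ((n / g) * t) := by ring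
    have hco : (n / g).Coprime (kn / g) :=
      (Nat.coprime_div_gcd_div_gcd (m := kn) (n := n) hgpos).symm
    exact hco.dvd_of_dvd_mul_right ⟨t, hstep⟩
  · rintro ⟨t, ht⟩
    refine ⟨(kn / g) * t, ?_⟩
    calc j * kn = (n / g) * t * kn := by rw [ht]
      _ = (n / g) * kn * t := by ring
      _ = (n / g) * (g * (kn / g)) * t := by rw [Nat.mul_div_cancel' hgk]
      _ = ((n / g) * g) * (kn / g) * t := by ring
      _ = n * ((kn / g) * t) := by rw [Nat.div_mul_cancel hgn]; ring

lemma mod_zero_iff_ord (kn n : Nat) (hn : 0 < n) (j : Nat) :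
    (j * kn) % n = 0 ↔ (n / Nat.gcd kn n) ∣ j := by
  rw [← Nat.dvd_iff_mod_eq_zero]
  exact dvd_mul_iff_ord kn n hn j

-- the orbit 1*kn, 2*kn, …, m*kn (mod n) is a permutation of the multiples 0, g, …, (m-1)*g
lemma orbit_perm (kn n : Nat) (hn : 0 < n) :
    ((List.range (n / Nat.gcd kn n)).map (fun t => ((t + 1) * kn) % n)).Perm
      ((List.range (n / Nat.gcd kn n)).map (fun s => Nat.gcd kn n * s)) := by
  set g := Nat.gcd kn n with hgdef
  set m := n / g with hmdef
  have hgpos : 0 < g := Nat.gcd_pos_of_pos_right _ hn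
  have hgn : g ∣ n := Nat.gcd_dvd_right _ _
  have hgk : g ∣ kn := Nat.gcd_dvd_left _ _
  have key : ∀ x y : Nat, x < m → y < m → x ≤ y →
      ((x + 1) * kn) % n = ((y + 1) * kn) % n → x = y := by
    intro x y hx hy hle hxy
    have hmul : (x + 1) * kn ≤ (y + 1) * kn := Nat.mul_le_mul_right _ (by omega)
    have hdvd : n ∣ (y - x) * kn := by
      have h2 := (Nat.modEq_iff_dvd' hmul).mp hxy
      rwa [show (y + 1) * kn - (x + 1) * kn = (y - x) * kn by
        rw [← Nat.sub_mul]; congr 1; omega] at h2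
    have hmd : m ∣ (y - x) := (dvd_mul_iff_ord kn n hn _).mp hdvd
    rcases Nat.eq_zero_or_pos (y - x) with h0 | hpos
    · omega
    · have := Nat.le_of_dvd hpos hmd; omega
  have hnodA : ((List.range m).map (fun t => ((t + 1) * kn) % n)).Nodup := by
    refine List.Nodup.map_on ?_ List.nodup_range
    intro x hx y hy hxy
    rw [List.mem_range] at hx hy
    rcases le_total x y with hle | hle
    · exact key x y hx hy hle hxy
    · exact (key y x hy hx hle hxy.symm).symm
  have hsub : ((List.range m).map (fun t => ((t + 1) * kn) % n)) ⊆
      ((List.range m).map (fun s => g * s)) := by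
    intro e he
    rw [List.mem_map] at he ⊢
    obtain ⟨t, _, rfl⟩ := he
    have helt : ((t + 1) * kn) % n < n := Nat.mod_lt _ hn
    have hge : g ∣ ((t + 1) * kn) % n :=
      (Nat.dvd_mod_iff hgn).mpr (Dvd.dvd.mul_left hgk (t + 1))
    refine ⟨((t + 1) * kn) % n / g, ?_, Nat.mul_div_cancel' hge⟩
    rw [List.mem_range, hmdef]
    exact Nat.div_lt_div_of_lt_of_dvd hgn helt
  exact (hnodA.subperm hsub).perm_of_length_le (by simp)

-- what A's while-loop computes, given fuel ≥ remaining steps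
lemma loopA_run (c : List Int) (k : Int) (kn : Nat)
    (hn : 0 < c.length)
    (hkn : (kn : Int) = k % (c.length : Int)) :
    ∀ (d j : Nat) (acc : Int), 1 ≤ j → j ≤ c.length / Nat.gcd kn c.length →
      c.length / Nat.gcd kn c.length - j ≤ d →
      loopA c k (c.length : Int) d (((j * kn) % c.length : Nat) : Int) acc
        = acc - ((List.range (c.length / Nat.gcd kn c.length - j)).map
            (fun s => PySem.List.pyGetD c ((((j + 1 + s) * kn) % c.length : Nat) : Int) 0 * 2 + 1)).sum := by
  intro d
  induction d with
  | zero =>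
    intro j acc h1 hjm hd
    have h0 : c.length / Nat.gcd kn c.length - j = 0 := by omega
    rw [h0]
    simp [loopA]
  | succ d ih =>
    intro j acc h1 hjm hd
    set m := c.length / Nat.gcd kn c.length with hmdef
    by_cases hj : j = m
    · have hz : (j * kn) % c.length = 0 := by
        rw [mod_zero_iff_ord kn c.length hn j, ← hmdef, hj]
      rw [hz, hj]
      simp [loopA]
    · have hjlt : j < m := lt_of_le_of_ne hjm hj
      have hnz : (((j * kn) % c.length : Nat) : Int) ≠ 0 := by
        intro h
        have h0 : (j * kn) % c.length = 0 := by exact_mod_cast h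
        have hmd := (mod_zero_iff_ord kn c.length hn j).mp h0
        have := Nat.le_of_dvd (by omega) hmd
        omega
      have hposI : (0 : Int) < (c.length : Int) := by exact_mod_cast hn
      have hi' : PySem.Int.mod ((((j * kn) % c.length : Nat) : Int) + k) (c.length : Int)
          = ((((j + 1) * kn) % c.length : Nat) : Int) := by
        rw [PySem.Int.mod_eq_emod_of_pos hposI]
        rw [Int.natCast_mod, Int.natCast_mod]
        push_cast
        calc ((j : Int) * kn % c.length + k) % (c.length : Int)
            = ((j : Int) * kn + k) % (c.length : Int) := Int.emod_add_emod _ _ _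
          _ = (((j : Int) * kn) % c.length + k % c.length) % (c.length : Int) := Int.add_emod _ _ _
          _ = (((j : Int) * kn) % c.length + (kn : Int) % c.length) % (c.length : Int) := by
              have h2 : (kn : Int) % (c.length : Int) = (kn : Int) := by
                rw [hkn]; exact Int.emod_emod_of_dvd _ dvd_rfl
              rw [h2, ← hkn]
          _ = (((j : Int) * kn) + (kn : Int)) % (c.length : Int) := by
              rw [← Int.add_emod]
          _ = (((j : Int) + 1) * kn) % (c.length : Int) := by ring_nf
      simp only [loopA, if_neg hnz, hi']
      rw [ih (j + 1) _ (by omega) (by omega) (by omega)]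
      rw [show m - j = (m - (j + 1)) + 1 by omega, List.range_succ_eq_map,
        List.map_cons, List.sum_cons, List.map_map]
      have hfun : ((fun s => PySem.List.pyGetD c ((((j + 1 + s) * kn) % c.length : Nat) : Int) 0 * 2 + 1) ∘ Nat.succ)
          = (fun s => PySem.List.pyGetD c ((((j + 1 + 1 + s) * kn) % c.length : Nat) : Int) 0 * 2 + 1) := by
        funext s
        simp only [Function.comp]
        rw [show j + 1 + Nat.succ s = j + 1 + 1 + s by omega]
      rw [hfun]
      simp only [Nat.add_zero]
      ring

-- ===== VERDICT (by name: the statement is the Claim_ definition above) =====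
theorem jumpingOnClouds_spec : Claim_equal_jumpingOnClouds := by
  intro c k _ hpre
  unfold Spec_jumpingOnClouds
  have hn : 0 < c.length := List.length_pos_of_ne_nil hpre
  have hposI : (0 : Int) < (c.length : Int) := by exact_mod_cast hn
  have hmodk : PySem.Int.mod k (c.length : Int) = k % (c.length : Int) :=
    PySem.Int.mod_eq_emod_of_pos hposI
  set kn := (k % (c.length : Int)).toNat with hkndef
  have hknc : (kn : Int) = k % (c.length : Int) :=
    Int.toNat_of_nonneg (Int.emod_nonneg k (ne_of_gt hposI))
  have hknlt : kn < c.length := by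
    have h1 := Int.emod_lt_of_pos k hposI
    omega
  set g := Nat.gcd kn c.length with hgdef
  set m := c.length / g with hmdef
  have hgpos : 0 < g := Nat.gcd_pos_of_pos_right _ hn
  have hgn : g ∣ c.length := Nat.gcd_dvd_right _ _
  have hm1 : 1 ≤ m := Nat.div_pos (Nat.le_of_dvd hn hgn) hgpos
  have hmle : m ≤ c.length := Nat.div_le_self _ _
  have hgm : g * m = c.length := Nat.mul_div_cancel' hgn
  have hidx : (((1 * kn) % c.length : Nat) : Int) = (kn : Int) := by
    rw [one_mul, Nat.mod_eq_of_lt hknlt]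
  have hA : jumpingOnClouds c k
      = (100 - (PySem.List.pyGetD c ((kn : Int)) 0 * 2 + 1))
        - ((List.range (m - 1)).map
            (fun s => PySem.List.pyGetD c ((((1 + 1 + s) * kn) % c.length : Nat) : Int) 0 * 2 + 1)).sum := by
    simp only [jumpingOnClouds]
    rw [hmodk, ← hknc, ← hidx]
    rw [loopA_run c k kn hn hknc c.length 1 _ le_rfl hm1 (le_trans (Nat.sub_le m 1) hmle)]
  have hA2 : jumpingOnClouds c k
      = 100 - ((List.range m).map
          (fun t => PySem.List.pyGetD c ((((t + 1) * kn) % c.length : Nat) : Int) 0 * 2 + 1)).sum := by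
    have hr : List.range m = List.range ((m - 1) + 1) := by congr 1; omega
    rw [hA, hr, List.range_succ_eq_map,
      List.map_cons, List.sum_cons, List.map_map]
    have h0 : ((0 + 1) * kn) % c.length = kn := by
      rw [Nat.zero_add, one_mul, Nat.mod_eq_of_lt hknlt]
    rw [h0]
    have hfun : ((fun t => PySem.List.pyGetD c ((((t + 1) * kn) % c.length : Nat) : Int) 0 * 2 + 1) ∘ Nat.succ)
        = (fun s => PySem.List.pyGetD c ((((1 + 1 + s) * kn) % c.length : Nat) : Int) 0 * 2 + 1) := by
      funext s
      simp only [Function.comp]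
      rw [show Nat.succ s + 1 = 1 + 1 + s by omega]
    rw [hfun]
    omega
  have hgcd : gcdLoop (PySem.Int.mod k (c.length : Int)) (c.length : Int) = (g : Int) := by
    rw [hmodk, ← hknc]
    exact gcdLoop_natCast c.length kn
  have hcast : (c.length : Int) = (g : Int) * m := by exact_mod_cast hgm.symm
  have hcnt : (((c.length : Int) - 0 + (g : Int) - 1) / (g : Int)).toNat = m := by
    rw [hcast]
    rw [show (g : Int) * m - 0 + g - 1 = ((g : Int) - 1) + (g : Int) * m by ring]
    rw [Int.add_mul_ediv_left _ _ (by exact_mod_cast hgpos.ne')]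
    rw [Int.ediv_eq_zero_of_lt (by omega) (by omega)]
    simp
  have hrange : PySem.List.pyRange 0 (c.length : Int) (g : Int)
      = (List.range m).map (fun s => ((g * s : Nat) : Int)) := by
    rw [PySem.List.pyRange_of_pos 0 _ (by exact_mod_cast hgpos), if_pos hposI]
    rw [show (c.length : Int) - 0 + (g : Int) - 1 = (c.length : Int) - 0 + (g : Int) - 1 from rfl]
    rw [hcnt]
    apply List.map_congr_left
    intro s _
    push_cast
    ring
  have hB : jumpingOnClouds_alt c k
      = 100 - ((List.range m).map
          (fun s => PySem.List.pyGetD c (((g * s : Nat) : Int)) 0 * 2 + 1)).sum := by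
    simp only [jumpingOnClouds_alt]
    rw [hgcd, hrange, List.map_map]
    congr 2
    apply List.map_congr_left
    intro s _
    simp only [Function.comp]
    ring
  rw [hA2, hB]
  congr 1
  have hperm := List.Perm.map (fun e : Nat => PySem.List.pyGetD c (e : Int) 0 * 2 + 1)
    (orbit_perm kn c.length hn)
  have hsum := hperm.sum_eq
  simp only [List.map_map] at hsum
  exact hsum
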